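-- pv_equiv track=rewrite | github.com/mohammadfaiizan/ProjectI | DSA/Problem/Graph/07_Topological_Sort_DAG/1591_Strange_Printer_II.py | isPrintable_dfs_cycle_detection
-- ===== SOURCE A (Python) =====
-- from typing import List, Set, Dict, Tuple
-- from collections import defaultdict, deque
--
-- def isPrintable_dfs_cycle_detection(targetGrid: List[List[int]]) -> bool:
--     """
--     Approach 2: DFS with Cycle Detection
--
--     Use DFS to detect cycles in color dependency graph.
--
--     Time: O(m*n + C²), Space: O(C²)
--     """
--     if not targetGrid or not targetGrid[0]:
--         return True
--
--     m, n = len(targetGrid), len(targetGrid[0])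
--
--     # Find color rectangles
--     color_rect = {}
--     for i in range(m):
--         for j in range(n):
--             color = targetGrid[i][j]
--             if color not in color_rect:
--                 color_rect[color] = [i, i, j, j]
--             else:
--                 rect = color_rect[color]
--                 rect[0] = min(rect[0], i)
--                 rect[1] = max(rect[1], i)
--                 rect[2] = min(rect[2], j)
--                 rect[3] = max(rect[3], j)
--
--     # Build dependency graph
--     dependencies = defaultdict(set)
--
--     for color, (r1, r2, c1, c2) in color_rect.items():
--         for i in range(r1, r2 + 1):
--             for j in range(c1, c2 + 1):
--                 if targetGrid[i][j] != color:
--                     dependencies[targetGrid[i][j]].add(color)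
--
--     # DFS cycle detection
--     WHITE, GRAY, BLACK = 0, 1, 2
--     color_state = {color: WHITE for color in color_rect}
--
--     def has_cycle(color: int) -> bool:
--         if color_state[color] == GRAY:  # Back edge found
--             return True
--         if color_state[color] == BLACK:  # Already processed
--             return False
--
--         color_state[color] = GRAY
--
--         for dependent in dependencies[color]:
--             if has_cycle(dependent):
--                 return True
--
--         color_state[color] = BLACK
--         return False
--
--     # Check for cycles starting from each unvisited color
--     for color in color_rect:
--         if color_state[color] == WHITE:
--             if has_cycle(color):
--                 return False
--
--     return True
-- ===== SOURCE B (Python) =====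
-- from typing import List
--
--
-- def isPrintable_dfs_cycle_detection(targetGrid: List[List[int]]) -> bool:
--     """
--     Alternative: same bounding rectangles and dependency edges, but the cycle
--     test is iterative source elimination (layered Kahn) instead of recursive
--     three-color DFS: repeatedly delete every color that no remaining color
--     depends on; the grid is printable iff everything gets deleted.
--     """
--     if not targetGrid or not targetGrid[0]:
--         return True
--
--     m, n = len(targetGrid), len(targetGrid[0])
--
--     # Bounding rectangle of each color.
--     color_rect = {}
--     for i in range(m):
--         for j in range(n):
--             color = targetGrid[i][j]
--             if color in color_rect:
--                 r1, r2, c1, c2 = color_rect[color]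
--                 color_rect[color] = (min(r1, i), max(r2, i), min(c1, j), max(c2, j))
--             else:
--                 color_rect[color] = (i, i, j, j)
--
--     # Edge (a, b): color a must be printed after color b
--     # (a cell of color a lies inside b's rectangle).
--     edges = set()
--     for color, (r1, r2, c1, c2) in color_rect.items():
--         for i in range(r1, r2 + 1):
--             for j in range(c1, c2 + 1):
--                 a = targetGrid[i][j]
--                 if a != color:
--                     edges.add((a, color))
--
--     # Layered source elimination until a fixpoint: each round keeps only the
--     # colors some remaining color still depends on; the survivors of the
--     # fixpoint are exactly the colors involved in cycles.
--     remaining = set(color_rect)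
--     while True:
--         targets = {b for (a, b) in edges if a in remaining}
--         kept = remaining & targets
--         if len(kept) == len(remaining):
--             break
--         remaining = kept
--     return not remaining
-- ===== Notes on version B (the rewrite author's own statement) =====
-- stated objective: alternative
-- what changed: The recursive three-color DFS cycle detection over the color-dependency graph is replaced by iterative source elimination (layered Kahn): repeatedly intersect the remaining colors with the targets of edges leaving remaining colors until a fixpoint, and report printable iff no color survives; edges are kept as a flat pair set instead of A's dict of successor sets.
import Mathlib
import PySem

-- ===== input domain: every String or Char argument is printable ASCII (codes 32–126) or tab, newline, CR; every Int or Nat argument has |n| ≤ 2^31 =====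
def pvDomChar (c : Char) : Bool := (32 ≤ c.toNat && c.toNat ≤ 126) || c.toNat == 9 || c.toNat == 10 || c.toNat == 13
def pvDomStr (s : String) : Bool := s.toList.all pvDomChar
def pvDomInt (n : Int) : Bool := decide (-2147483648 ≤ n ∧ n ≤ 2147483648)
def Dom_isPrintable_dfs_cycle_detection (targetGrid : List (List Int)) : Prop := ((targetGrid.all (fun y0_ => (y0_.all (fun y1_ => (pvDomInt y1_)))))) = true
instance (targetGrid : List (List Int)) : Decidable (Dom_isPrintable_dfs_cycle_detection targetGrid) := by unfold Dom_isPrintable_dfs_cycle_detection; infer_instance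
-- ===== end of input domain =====

-- B keeps A's bounding-rectangle and dependency-edge construction but replaces the
-- recursive three-color DFS cycle detection by iterative source elimination
-- (layered Kahn): a genuinely different cycle test of similar cost ("alternative").

-- ===== PORT A =====

-- targetGrid[i][j] (total form; Pre_ keeps the indices in range)
def pvCell (g : List (List Int)) (i j : Int) : Int :=
  PySem.List.pyGetD (PySem.List.pyGetD g i []) j 0

-- one step of the bounding-rectangle loop body (shared: A and B compute color_rect identically)
def pvRectStep (g : List (List Int)) (d : PySem.Dict Int (Int × Int × Int × Int)) (i j : Int) :
    PySem.Dict Int (Int × Int × Int × Int) :=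
  d.insert (pvCell g i j)
    (match d.get? (pvCell g i j) with
     | none => (i, i, j, j)
     | some (r1, r2, c1, c2) => (min r1 i, max r2 i, min c1 j, max c2 j))

def pvRects (g : List (List Int)) (m n : Int) : PySem.Dict Int (Int × Int × Int × Int) :=
  (PySem.List.pyRange 0 m).foldl (fun d i =>
    (PySem.List.pyRange 0 n).foldl (fun d j => pvRectStep g d i j) d) PySem.Dict.empty

-- dependencies = defaultdict(set); dependencies[targetGrid[i][j]].add(color)
def pvDeps (g : List (List Int)) (cr : PySem.Dict Int (Int × Int × Int × Int)) :
    PySem.Dict Int (PySem.Set Int) :=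
  cr.items.foldl (fun dep it =>
    match it with
    | (color, r1, r2, c1, c2) =>
      (PySem.List.pyRange r1 (r2 + 1)).foldl (fun dep i =>
        (PySem.List.pyRange c1 (c2 + 1)).foldl (fun dep j =>
          if pvCell g i j ≠ color then
            dep.modify (pvCell g i j) PySem.Set.empty (fun s => s.add color)
          else dep) dep) dep) PySem.Dict.empty

-- has_cycle (recursive, three colors 0/1/2 in the state dict), with fuel covering
-- the recursion depth (proved sufficient; the 0-fuel branch is never reached)
mutual
def pvDfs (adj : Int → List Int) : Nat → Int → PySem.Dict Int Int → Bool × PySem.Dict Int Int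
  | fuel, c, st =>
    if st.getD c 0 = 1 then (true, st)
    else if st.getD c 0 = 2 then (false, st)
    else
      match fuel with
      | 0 => (true, st)
      | f + 1 =>
        let r := pvDfsList adj f (adj c) (st.insert c 1)
        if r.1 then (true, r.2) else (false, r.2.insert c 2)
  termination_by fuel _ _ => (fuel, 0)

def pvDfsList (adj : Int → List Int) : Nat → List Int → PySem.Dict Int Int → Bool × PySem.Dict Int Int
  | _, [], st => (false, st)
  | fuel, d :: ds, st =>
    let r := pvDfs adj fuel d st
    if r.1 then r else pvDfsList adj fuel ds r.2
  termination_by fuel ds _ => (fuel, ds.length + 1)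
end

-- for color in color_rect: if WHITE and has_cycle(color): return False
def pvDfsAll (adj : Int → List Int) (fuel : Nat) : List Int → PySem.Dict Int Int → Bool
  | [], _ => true
  | c :: cs, st =>
    if st.getD c 0 = 0 then
      let r := pvDfs adj fuel c st
      if r.1 then false else pvDfsAll adj fuel cs r.2
    else pvDfsAll adj fuel cs st

def isPrintable_dfs_cycle_detection (targetGrid : List (List Int)) : Bool :=
  if targetGrid = [] ∨ targetGrid.headD [] = [] then true
  else
    let cr := pvRects targetGrid (targetGrid.length : Int) ((targetGrid.headD []).length : Int)
    let adj := fun a => (pvDeps targetGrid cr).getD a PySem.Set.empty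
    let st0 := cr.keys.foldl (fun d c => d.insert c (0 : Int)) PySem.Dict.empty
    pvDfsAll adj (cr.items.length + 1) cr.keys st0

-- ===== PORT B =====

-- edges = {(a, color) : a cell of color a lies inside color's rectangle}
def pvEdges (g : List (List Int)) (cr : PySem.Dict Int (Int × Int × Int × Int)) :
    PySem.Set (Int × Int) :=
  cr.items.foldl (fun es it =>
    match it with
    | (color, r1, r2, c1, c2) =>
      (PySem.List.pyRange r1 (r2 + 1)).foldl (fun es i =>
        (PySem.List.pyRange c1 (c2 + 1)).foldl (fun es j =>
          if pvCell g i j ≠ color then es.add (pvCell g i j, color) else es) es) es)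
    PySem.Set.empty

-- targets = {b for (a, b) in edges if a in remaining}
def pvTargets (es : PySem.Set (Int × Int)) (rem : List Int) : PySem.Set Int :=
  PySem.Set.ofList ((es.filter (fun p => decide (p.1 ∈ rem))).map (fun p => p.2))

-- one elimination round: kept = remaining & targets
def pvPrune (es : PySem.Set (Int × Int)) (rem : List Int) : List Int :=
  PySem.Set.inter rem (pvTargets es rem)

lemma pvPrune_length_le (es : PySem.Set (Int × Int)) (rem : List Int) :
    (pvPrune es rem).length ≤ rem.length :=
  List.length_filter_le _ _

-- while True: kept = remaining & targets; if len(kept) == len(remaining): break; …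
def pvShrink (es : PySem.Set (Int × Int)) (rem : List Int) : List Int :=
  let kept := pvPrune es rem
  if _h : kept.length = rem.length then rem else pvShrink es kept
termination_by rem.length
decreasing_by
  have hle := pvPrune_length_le es rem
  have hne : (pvPrune es rem).length ≠ rem.length := _h
  show (pvPrune es rem).length < rem.length
  omega

def isPrintable_dfs_cycle_detection_alt (targetGrid : List (List Int)) : Bool :=
  if targetGrid = [] ∨ targetGrid.headD [] = [] then true
  else
    let cr := pvRects targetGrid (targetGrid.length : Int) ((targetGrid.headD []).length : Int)
    let es := pvEdges targetGrid cr
    (pvShrink es (PySem.Set.ofList cr.keys)).isEmpty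

-- ===== PRECONDITION & SPEC =====

-- Pre_ excludes ragged grids in which some row is shorter than the first row:
-- there A (and B alike) raises IndexError on targetGrid[i][j].
def Pre_isPrintable_dfs_cycle_detection (targetGrid : List (List Int)) : Prop :=
  ∀ row ∈ targetGrid, (targetGrid.headD []).length ≤ row.length

instance (targetGrid : List (List Int)) : Decidable (Pre_isPrintable_dfs_cycle_detection targetGrid) := by
  unfold Pre_isPrintable_dfs_cycle_detection; infer_instance

def pvWitness_isPrintable_dfs_cycle_detection : List (List Int) := [[1, 2], [2, 1]]

def Spec_isPrintable_dfs_cycle_detection (targetGrid : List (List Int)) (out : Bool) : Prop :=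
  out = isPrintable_dfs_cycle_detection_alt targetGrid

instance (targetGrid : List (List Int)) (out : Bool) : Decidable (Spec_isPrintable_dfs_cycle_detection targetGrid out) := by
  unfold Spec_isPrintable_dfs_cycle_detection; infer_instance

-- ===== CLAIM (what is proved, stated in full; the proofs are below) =====
def Claim_equal_isPrintable_dfs_cycle_detection : Prop := ∀ (targetGrid : List (List Int)), Dom_isPrintable_dfs_cycle_detection targetGrid → Pre_isPrintable_dfs_cycle_detection targetGrid → Spec_isPrintable_dfs_cycle_detection targetGrid (isPrintable_dfs_cycle_detection targetGrid)

-- ===== LEMMAS AND PROOFS =====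

-- The dependency relation: b ∈ adj a means "a depends on color b" (edge a → b).
def pvE (adj : Int → List Int) (a b : Int) : Prop := b ∈ adj a

-- abstract view of the DFS state dict: gray list gl (the chain), black list bs
def pvRep (st : PySem.Dict Int Int) (gl bs : List Int) : Prop :=
  ∀ x : Int, st.getD x 0 = if x ∈ gl then (1 : Int) else if x ∈ bs then 2 else 0

def pvClosed (adj : Int → List Int) (bs : List Int) : Prop :=
  ∀ b ∈ bs, ∀ x, x ∈ adj b → x ∈ bs

def pvInv (adj : Int → List Int) (V gl bs : List Int) : Prop :=
  gl.Nodup ∧ (∀ g ∈ gl, g ∈ V) ∧ (∀ b ∈ bs, b ∈ V) ∧ (∀ x ∈ gl, x ∉ bs) ∧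
    List.IsChain (pvE adj) gl ∧ pvClosed adj bs ∧
    (∀ b ∈ bs, ¬ Relation.TransGen (pvE adj) b b)

def pvWc (V gl bs : List Int) : Nat :=
  (V.filter (fun x => decide (x ∉ gl) && decide (x ∉ bs))).length

-- ---- graph-building characterizations ----

lemma pvFoldlNested {σ : Type} (f : σ → Int → Int → σ) (l1 l2 : List Int) (s : σ) :
    l1.foldl (fun s i => l2.foldl (fun s j => f s i j) s) s
      = (l1.flatMap (fun i => l2.map (fun j => (i, j)))).foldl (fun s p => f s p.1 p.2) s := by
  induction l1 generalizing s with
  | nil => rfl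
  | cons a l ih => simp [List.flatMap_cons, List.foldl_append, List.foldl_map, ih]

def pvCells (m n : Int) : List (Int × Int) :=
  (PySem.List.pyRange 0 m).flatMap (fun i => (PySem.List.pyRange 0 n).map (fun j => (i, j)))

lemma mem_pvCells {m n : Int} {p : Int × Int} :
    p ∈ pvCells m n ↔ 0 ≤ p.1 ∧ p.1 < m ∧ 0 ≤ p.2 ∧ p.2 < n := by
  obtain ⟨i, j⟩ := p
  simp only [pvCells, List.mem_flatMap, List.mem_map, PySem.List.mem_pyRange_one, Prod.mk.injEq]
  constructor
  · rintro ⟨i', hi, j', hj, h1, h2⟩; subst h1; subst h2; exact ⟨hi.1, hi.2, hj.1, hj.2⟩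
  · rintro ⟨h0, h1, h2, h3⟩; exact ⟨i, ⟨h0, h1⟩, j, ⟨h2, h3⟩, rfl, rfl⟩

lemma pvRects_eq (g : List (List Int)) (m n : Int) :
    pvRects g m n = (pvCells m n).foldl (fun d p => pvRectStep g d p.1 p.2) PySem.Dict.empty :=
  pvFoldlNested _ _ _ _

lemma pvRectStep_eq (g : List (List Int)) :
    (fun (d : PySem.Dict Int (Int × Int × Int × Int)) (p : Int × Int) => pvRectStep g d p.1 p.2)
      = fun d p => d.insert ((fun q : Int × Int => pvCell g q.1 q.2) p)
          ((fun (d : PySem.Dict Int (Int × Int × Int × Int)) (p : Int × Int) =>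
            (match d.get? (pvCell g p.1 p.2) with
             | none => (p.1, p.1, p.2, p.2)
             | some (r1, r2, c1, c2) => (min r1 p.1, max r2 p.1, min c1 p.2, max c2 p.2))) d p) := by
  funext d p; rfl

lemma pvRects_keys (g : List (List Int)) (m n : Int) :
    (pvRects g m n).keys = PySem.Set.ofList ((pvCells m n).map (fun p => pvCell g p.1 p.2)) := by
  rw [pvRects_eq, pvRectStep_eq g, PySem.Dict.keys_foldl_insert_key, PySem.Dict.keys_empty,
    PySem.Set.update_nil_left]

lemma pvRects_nodup_keys (g : List (List Int)) (m n : Int) : (pvRects g m n).keys.Nodup := by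
  rw [pvRects_eq, pvRectStep_eq g]
  exact PySem.Dict.nodup_keys_foldl_insert_key _ _ _ _ PySem.Dict.nodup_keys_empty

lemma pvRects_bounds (g : List (List Int)) (m n : Int) :
    ∀ c r1 r2 c1 c2, (pvRects g m n).get? c = some (r1, r2, c1, c2) →
      0 ≤ r1 ∧ r2 < m ∧ 0 ≤ c1 ∧ c2 < n := by
  rw [pvRects_eq]
  have main : ∀ (ps : List (Int × Int)) (d : PySem.Dict Int (Int × Int × Int × Int)),
      (∀ p ∈ ps, 0 ≤ p.1 ∧ p.1 < m ∧ 0 ≤ p.2 ∧ p.2 < n) →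
      (∀ c r1 r2 c1 c2, d.get? c = some (r1, r2, c1, c2) → 0 ≤ r1 ∧ r2 < m ∧ 0 ≤ c1 ∧ c2 < n) →
      ∀ c r1 r2 c1 c2, (ps.foldl (fun d p => pvRectStep g d p.1 p.2) d).get? c = some (r1, r2, c1, c2) →
        0 ≤ r1 ∧ r2 < m ∧ 0 ≤ c1 ∧ c2 < n := by
    intro ps
    induction ps with
    | nil => intro d _ hd; exact hd
    | cons p ps ih =>
      intro d hps hd
      refine ih _ (fun q hq => hps q (by simp [hq])) ?_
      intro c r1 r2 c1 c2 hc
      obtain ⟨h0, h1, h2, h3⟩ := hps p (by simp)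
      simp only [pvRectStep] at hc
      rw [PySem.Dict.get?_insert] at hc
      split_ifs at hc with hck
      · cases hv : d.get? (pvCell g p.1 p.2) with
        | none =>
          rw [hv] at hc
          simp only [Option.some.injEq, Prod.mk.injEq] at hc
          obtain ⟨e1, e2, e3, e4⟩ := hc
          subst e1; subst e2; subst e3; subst e4
          exact ⟨h0, h1, h2, h3⟩
        | some v =>
          obtain ⟨a1, a2, a3, a4⟩ := v
          obtain ⟨b0, b1, b2, b3⟩ := hd _ _ _ _ _ hv
          rw [hv] at hc
          simp only [Option.some.injEq, Prod.mk.injEq] at hc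
          obtain ⟨e1, e2, e3, e4⟩ := hc
          subst e1; subst e2; subst e3; subst e4
          exact ⟨le_min b0 h0, max_lt b1 h1, le_min b2 h2, max_lt b3 h3⟩
      · exact hd _ _ _ _ _ hc
  refine main _ _ (fun p hp => mem_pvCells.mp hp) ?_
  intro c r1 r2 c1 c2 hc
  simp [PySem.Dict.get?_empty] at hc

-- cells of one bounding rectangle
def pvRCells (v : Int × Int × Int × Int) : List (Int × Int) :=
  (PySem.List.pyRange v.1 (v.2.1 + 1)).flatMap
    (fun i => (PySem.List.pyRange v.2.2.1 (v.2.2.2 + 1)).map (fun j => (i, j)))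

lemma mem_pvRCells {v : Int × Int × Int × Int} {p : Int × Int} :
    p ∈ pvRCells v ↔ v.1 ≤ p.1 ∧ p.1 ≤ v.2.1 ∧ v.2.2.1 ≤ p.2 ∧ p.2 ≤ v.2.2.2 := by
  obtain ⟨i, j⟩ := p
  simp only [pvRCells, List.mem_flatMap, List.mem_map, PySem.List.mem_pyRange_one, Prod.mk.injEq]
  constructor
  · rintro ⟨i', hi, j', hj, h1, h2⟩; subst h1; subst h2; omega
  · rintro ⟨h0, h1, h2, h3⟩; exact ⟨i, ⟨h0, by omega⟩, j, ⟨h2, by omega⟩, rfl, rfl⟩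

-- the dependency relation, described directly from the grid and the rectangles
def pvHasEdge (g : List (List Int)) (cr : PySem.Dict Int (Int × Int × Int × Int)) (a b : Int) : Prop :=
  ∃ v, (b, v) ∈ cr.items ∧ ∃ p ∈ pvRCells v, pvCell g p.1 p.2 = a ∧ a ≠ b

-- A's dict-of-sets and B's pair-set describe the same relation pvHasEdge

lemma pvDepsItem_mem (g : List (List Int)) (col x y : Int) :
    ∀ (ps : List (Int × Int)) (dep : PySem.Dict Int (PySem.Set Int)),
      (y ∈ (ps.foldl (fun dep p =>
          if pvCell g p.1 p.2 ≠ col then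
            dep.modify (pvCell g p.1 p.2) PySem.Set.empty (fun s => s.add col)
          else dep) dep).getD x PySem.Set.empty
        ↔ y ∈ dep.getD x PySem.Set.empty ∨ (y = col ∧ ∃ p ∈ ps, pvCell g p.1 p.2 = x ∧ x ≠ col)) := by
  intro ps
  induction ps with
  | nil => intro dep; simp
  | cons p ps ih =>
    intro dep
    rw [List.foldl_cons]
    by_cases hc : pvCell g p.1 p.2 ≠ col
    · rw [if_pos hc, ih]
      by_cases hx : pvCell g p.1 p.2 = x
      · subst hx
        rw [PySem.Dict.getD_modify_self, PySem.Set.mem_add]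
        constructor
        · rintro (⟨h | h⟩ | h)
          · exact Or.inl h
          · exact Or.inr ⟨h, ⟨p, by simp, rfl, hc⟩⟩
          · exact Or.inr ⟨h.1, by obtain ⟨q, hq, hq2⟩ := h.2; exact ⟨q, by simp [hq], hq2⟩⟩
        · rintro (h | ⟨h1, q, hq, hq2, hq3⟩)
          · exact Or.inl (Or.inl h)
          · simp only [List.mem_cons] at hq
            rcases hq with hq | hq
            · exact Or.inl (Or.inr h1)
            · exact Or.inr ⟨h1, q, hq, hq2, hq3⟩
      · rw [PySem.Dict.getD_modify_of_ne _ _ _ (fun h => hx h.symm)]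
        constructor
        · rintro (h | h)
          · exact Or.inl h
          · exact Or.inr ⟨h.1, by obtain ⟨q, hq, hq2⟩ := h.2; exact ⟨q, by simp [hq], hq2⟩⟩
        · rintro (h | ⟨h1, q, hq, hq2, hq3⟩)
          · exact Or.inl h
          · simp only [List.mem_cons] at hq
            rcases hq with hq | hq
            · exact absurd hq2 (by subst hq; exact hx)
            · exact Or.inr ⟨h1, q, hq, hq2, hq3⟩
    · rw [if_neg hc, ih]
      simp only [ne_eq, not_not] at hc
      constructor
      · rintro (h | ⟨h1, q, hq, hq2, hq3⟩)
        · exact Or.inl h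
        · exact Or.inr ⟨h1, q, by simp [hq], hq2, hq3⟩
      · rintro (h | ⟨h1, q, hq, hq2, hq3⟩)
        · exact Or.inl h
        · simp only [List.mem_cons] at hq
          rcases hq with hq | hq
          · subst hq; rw [hc] at hq2; exact absurd hq2.symm hq3
          · exact Or.inr ⟨h1, q, hq, hq2, hq3⟩

lemma pvDepsItemFold_eq (g : List (List Int)) (it : Int × (Int × Int × Int × Int))
    (dep : PySem.Dict Int (PySem.Set Int)) :
    (match it with
     | (color, r1, r2, c1, c2) =>
       (PySem.List.pyRange r1 (r2 + 1)).foldl (fun dep i =>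
         (PySem.List.pyRange c1 (c2 + 1)).foldl (fun dep j =>
           if pvCell g i j ≠ color then
             dep.modify (pvCell g i j) PySem.Set.empty (fun s => s.add color)
           else dep) dep) dep)
    = (pvRCells it.2).foldl (fun dep p =>
        if pvCell g p.1 p.2 ≠ it.1 then
          dep.modify (pvCell g p.1 p.2) PySem.Set.empty (fun s => s.add it.1)
        else dep) dep := by
  obtain ⟨color, r1, r2, c1, c2⟩ := it
  exact pvFoldlNested (fun dep i j =>
    if pvCell g i j ≠ color then
      dep.modify (pvCell g i j) PySem.Set.empty (fun s => s.add color)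
    else dep) _ _ dep

lemma pvDeps_mem (g : List (List Int)) (cr : PySem.Dict Int (Int × Int × Int × Int)) (x y : Int) :
    y ∈ (pvDeps g cr).getD x PySem.Set.empty ↔ pvHasEdge g cr x y := by
  have main : ∀ (its : List (Int × (Int × Int × Int × Int))) (dep : PySem.Dict Int (PySem.Set Int)),
      (y ∈ (its.foldl (fun dep it =>
          (pvRCells it.2).foldl (fun dep p =>
            if pvCell g p.1 p.2 ≠ it.1 then
              dep.modify (pvCell g p.1 p.2) PySem.Set.empty (fun s => s.add it.1)
            else dep) dep) dep).getD x PySem.Set.empty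
        ↔ y ∈ dep.getD x PySem.Set.empty ∨
            ∃ v, (y, v) ∈ its ∧ ∃ p ∈ pvRCells v, pvCell g p.1 p.2 = x ∧ x ≠ y) := by
    intro its
    induction its with
    | nil => intro dep; simp
    | cons it its ih =>
      intro dep
      rw [List.foldl_cons, ih, pvDepsItem_mem]
      constructor
      · rintro (⟨h | ⟨h1, q, hq, hq2, hq3⟩⟩ | ⟨v, hv, hp⟩)
        · exact Or.inl h
        · subst h1; exact Or.inr ⟨it.2, by simp, q, hq, hq2, hq3⟩
        · exact Or.inr ⟨v, by simp [hv], hp⟩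
      · rintro (h | ⟨v, hv, hp⟩)
        · exact Or.inl (Or.inl h)
        · simp only [List.mem_cons] at hv
          rcases hv with hv | hv
          · refine Or.inl (Or.inr ?_)
            obtain ⟨h1, h2⟩ := Prod.ext_iff.mp hv
            subst h2
            obtain ⟨q, hq, hq2, hq3⟩ := hp
            exact ⟨h1, q, hq, hq2, by rw [← h1]; exact hq3⟩
          · exact Or.inr ⟨v, hv, hp⟩
  have hfold : pvDeps g cr = cr.items.foldl (fun dep it =>
      (pvRCells it.2).foldl (fun dep p =>
        if pvCell g p.1 p.2 ≠ it.1 then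
          dep.modify (pvCell g p.1 p.2) PySem.Set.empty (fun s => s.add it.1)
        else dep) dep) PySem.Dict.empty := by
    unfold pvDeps
    congr 1
    funext dep it
    exact pvDepsItemFold_eq g it dep
  rw [hfold, main, PySem.Dict.getD_empty]
  simp [pvHasEdge]

lemma pvEdgesItem_mem (g : List (List Int)) (col x y : Int) :
    ∀ (ps : List (Int × Int)) (es : PySem.Set (Int × Int)),
      ((x, y) ∈ ps.foldl (fun es p =>
          if pvCell g p.1 p.2 ≠ col then es.add (pvCell g p.1 p.2, col) else es) es
        ↔ (x, y) ∈ es ∨ (y = col ∧ ∃ p ∈ ps, pvCell g p.1 p.2 = x ∧ x ≠ col)) := by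
  intro ps
  induction ps with
  | nil => intro es; simp
  | cons p ps ih =>
    intro es
    rw [List.foldl_cons]
    by_cases hc : pvCell g p.1 p.2 ≠ col
    · rw [if_pos hc, ih, PySem.Set.mem_add]
      constructor
      · rintro (⟨h | h⟩ | ⟨h1, q, hq, hq2, hq3⟩)
        · exact Or.inl h
        · rw [Prod.mk.injEq] at h
          exact Or.inr ⟨h.2, p, by simp, h.1.symm, by rw [h.1]; exact hc⟩
        · exact Or.inr ⟨h1, q, by simp [hq], hq2, hq3⟩
      · rintro (h | ⟨h1, q, hq, hq2, hq3⟩)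
        · exact Or.inl (Or.inl h)
        · simp only [List.mem_cons] at hq
          rcases hq with hq | hq
          · subst hq; subst h1; exact Or.inl (Or.inr (by rw [Prod.mk.injEq]; exact ⟨hq2.symm, rfl⟩))
          · exact Or.inr ⟨h1, q, hq, hq2, hq3⟩
    · rw [if_neg hc, ih]
      simp only [ne_eq, not_not] at hc
      constructor
      · rintro (h | ⟨h1, q, hq, hq2, hq3⟩)
        · exact Or.inl h
        · exact Or.inr ⟨h1, q, by simp [hq], hq2, hq3⟩
      · rintro (h | ⟨h1, q, hq, hq2, hq3⟩)
        · exact Or.inl h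
        · simp only [List.mem_cons] at hq
          rcases hq with hq | hq
          · subst hq; rw [hc] at hq2; exact absurd hq2.symm hq3
          · exact Or.inr ⟨h1, q, hq, hq2, hq3⟩

lemma pvEdges_mem (g : List (List Int)) (cr : PySem.Dict Int (Int × Int × Int × Int)) (x y : Int) :
    (x, y) ∈ pvEdges g cr ↔ pvHasEdge g cr x y := by
  have main : ∀ (its : List (Int × (Int × Int × Int × Int))) (es : PySem.Set (Int × Int)),
      ((x, y) ∈ its.foldl (fun es it =>
          (pvRCells it.2).foldl (fun es p =>
            if pvCell g p.1 p.2 ≠ it.1 then es.add (pvCell g p.1 p.2, it.1) else es) es) es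
        ↔ (x, y) ∈ es ∨
            ∃ v, (y, v) ∈ its ∧ ∃ p ∈ pvRCells v, pvCell g p.1 p.2 = x ∧ x ≠ y) := by
    intro its
    induction its with
    | nil => intro es; simp
    | cons it its ih =>
      intro es
      rw [List.foldl_cons, ih, pvEdgesItem_mem]
      constructor
      · rintro (⟨h | ⟨h1, q, hq, hq2, hq3⟩⟩ | ⟨v, hv, hp⟩)
        · exact Or.inl h
        · subst h1; exact Or.inr ⟨it.2, by simp, q, hq, hq2, hq3⟩
        · exact Or.inr ⟨v, by simp [hv], hp⟩
      · rintro (h | ⟨v, hv, hp⟩)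
        · exact Or.inl (Or.inl h)
        · simp only [List.mem_cons] at hv
          rcases hv with hv | hv
          · refine Or.inl (Or.inr ?_)
            obtain ⟨h1, h2⟩ := Prod.ext_iff.mp hv
            subst h2
            obtain ⟨q, hq, hq2, hq3⟩ := hp
            exact ⟨h1, q, hq, hq2, by rw [← h1]; exact hq3⟩
          · exact Or.inr ⟨v, hv, hp⟩
  have hfold : pvEdges g cr = cr.items.foldl (fun es it =>
      (pvRCells it.2).foldl (fun es p =>
        if pvCell g p.1 p.2 ≠ it.1 then es.add (pvCell g p.1 p.2, it.1) else es) es)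
      PySem.Set.empty := by
    unfold pvEdges
    congr 1
    funext es it
    obtain ⟨color, r1, r2, c1, c2⟩ := it
    exact pvFoldlNested (fun es i j =>
      if pvCell g i j ≠ color then PySem.Set.add es (pvCell g i j, color) else es) _ _ es
  rw [hfold, main]
  simp [pvHasEdge, PySem.Set.empty]

-- both endpoints of an edge are colors of the grid (keys of color_rect)
lemma pvHasEdge_endpoints (g : List (List Int)) (m n : Int) (a b : Int)
    (hE : pvHasEdge g (pvRects g m n) a b) :
    a ∈ (pvRects g m n).keys ∧ b ∈ (pvRects g m n).keys := by
  obtain ⟨v, hv, p, hp, hcell, hne⟩ := hE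
  have hbk : b ∈ (pvRects g m n).keys := PySem.Dict.mem_keys_of_mem_items _ hv
  have hget : (pvRects g m n).get? b = some v :=
    PySem.Dict.get?_of_mem_items _ hv (pvRects_nodup_keys g m n)
  obtain ⟨v1, v2, v3, v4⟩ := v
  obtain ⟨b0, b1, b2, b3⟩ := pvRects_bounds g m n b v1 v2 v3 v4 hget
  have hpc := mem_pvRCells.mp hp
  have hpin : p ∈ pvCells m n := mem_pvCells.mpr (by simp at hpc ⊢; omega)
  have : a ∈ (pvRects g m n).keys := by
    rw [pvRects_keys, PySem.Set.mem_ofList, List.mem_map]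
    exact ⟨p, hpin, hcell⟩
  exact ⟨this, hbk⟩

-- ---- generic facts about cycles ----

lemma pvClosed_reach (adj : Int → List Int) (bs : List Int) (hcl : pvClosed adj bs)
    {s y : Int} (hs : s ∈ bs) (h : Relation.ReflTransGen (pvE adj) s y) : y ∈ bs := by
  induction h with
  | refl => exact hs
  | tail _ hstep ih => exact hcl _ ih _ hstep

lemma pvNoNewCycle (adj : Int → List Int) (bs : List Int) (c : Int) (hcl : pvClosed adj bs)
    (hsucc : ∀ d ∈ adj c, d ∈ bs) (hc : c ∉ bs) :
    ¬ Relation.TransGen (pvE adj) c c := by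
  intro h
  obtain ⟨s, hcs, hsc⟩ := Relation.TransGen.head'_iff.mp h
  exact hc (pvClosed_reach adj bs hcl (hsucc s hcs) hsc)

lemma pvChain_rtg (adj : Int → List Int) :
    ∀ (l : List Int) (a g : Int), List.IsChain (pvE adj) (a :: l) →
      (a :: l).getLast? = some g → Relation.ReflTransGen (pvE adj) a g := by
  intro l
  induction l with
  | nil => intro a g _ hg; rw [List.getLast?_singleton] at hg; cases hg; rfl
  | cons b l ih =>
    intro a g hch hg
    rw [List.getLast?_cons_cons] at hg
    have hab : pvE adj a b := (List.isChain_cons_cons.mp hch).1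
    exact Relation.ReflTransGen.head hab (ih b g (List.isChain_cons_cons.mp hch).2 hg)

lemma pvChain_cycle (adj : Int → List Int) (gl : List Int) (c : Int)
    (hch : List.IsChain (pvE adj) gl) (hc : c ∈ gl)
    (hlink : ∀ g, gl.getLast? = some g → pvE adj g c) :
    Relation.TransGen (pvE adj) c c := by
  obtain ⟨l1, l2, rfl⟩ := List.append_of_mem hc
  have h2 : List.IsChain (pvE adj) (c :: l2) := (List.isChain_append.mp hch).2.1
  have hlast : (l1 ++ c :: l2).getLast? = (c :: l2).getLast? := by
    rw [List.getLast?_append]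
    cases h : (c :: l2).getLast? with
    | none => simp [List.getLast?_eq_none_iff] at h
    | some gv => simp
  obtain ⟨gval, hgval⟩ : ∃ gv, (c :: l2).getLast? = some gv := by
    cases h : (c :: l2).getLast? with
    | none => simp at h
    | some gv => exact ⟨gv, rfl⟩
  have hrtg := pvChain_rtg adj l2 c gval h2 hgval
  have hec : pvE adj gval c := hlink gval (by rw [hlast, hgval])
  exact Relation.TransGen.trans_right hrtg (Relation.TransGen.single hec)

lemma pvCycle_in (adj : Int → List Int) (V : List Int)
    (hadj : ∀ a b, b ∈ adj a → a ∈ V ∧ b ∈ V) {z : Int}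
    (h : Relation.TransGen (pvE adj) z z) : z ∈ V := by
  obtain ⟨s, hzs, _⟩ := Relation.TransGen.head'_iff.mp h
  exact (hadj z s hzs).1

lemma pvCycle_pred (adj : Int → List Int) {c : Int}
    (h : Relation.TransGen (pvE adj) c c) :
    ∃ a, pvE adj a c ∧ Relation.TransGen (pvE adj) a a := by
  obtain ⟨b, hcb, hbc⟩ := Relation.TransGen.tail'_iff.mp h
  exact ⟨b, hbc, Relation.TransGen.trans_left (Relation.TransGen.single hbc) hcb⟩

-- a finite irreflexive transitive relation has a minimal element
lemma pvExistsMin {α : Type} (R : α → α → Prop)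
    (htr : ∀ a b c, R a b → R b c → R a c) :
    ∀ (l : List α), (∀ a ∈ l, ¬ R a a) → l ≠ [] → ∃ m ∈ l, ∀ x ∈ l, ¬ R x m := by
  intro l
  induction l with
  | nil => intro _ h; exact absurd rfl h
  | cons x l ih =>
    intro hirr _
    rcases List.eq_nil_or_concat' l with rfl | _
    · exact ⟨x, by simp, by simpa using hirr x (by simp)⟩
    · have hl : l ≠ [] := by rename_i h'; obtain ⟨_, _, rfl⟩ := h'; simp
      obtain ⟨m, hm, hmin⟩ := ih (fun a ha => hirr a (by simp [ha])) hl
      by_cases hxm : R x m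
      · refine ⟨x, by simp, ?_⟩
        intro y hy
        simp only [List.mem_cons] at hy
        rcases hy with rfl | hy
        · exact hirr y (by simp)
        · intro hyx; exact hmin y hy (htr y x m hyx hxm)
      · refine ⟨m, by simp [hm], ?_⟩
        intro y hy
        simp only [List.mem_cons] at hy
        rcases hy with rfl | hy
        · exact hxm
        · exact hmin y hy

-- ---- white-count bookkeeping ----

lemma pvWc_le (V gl bs : List Int) : pvWc V gl bs ≤ V.length :=
  List.length_filter_le _ _

lemma pvWc_mono (V gl bs bs' : List Int) (h : bs ⊆ bs') : pvWc V gl bs' ≤ pvWc V gl bs := by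
  unfold pvWc
  rw [← List.countP_eq_length_filter, ← List.countP_eq_length_filter]
  apply List.countP_mono_left
  intro x _ hx
  simp only [Bool.and_eq_true, decide_eq_true_eq] at hx ⊢
  exact ⟨hx.1, fun hb => hx.2 (h hb)⟩

lemma pvWc_gray_lt (V gl bs : List Int) (c : Int) (hcV : c ∈ V) (hcg : c ∉ gl) (hcb : c ∉ bs) :
    pvWc V (gl ++ [c]) bs < pvWc V gl bs := by
  unfold pvWc
  have hpred : (fun x => decide (x ∉ gl ++ [c]) && decide (x ∉ bs))
      = fun x => decide (x ≠ c) && (decide (x ∉ gl) && decide (x ∉ bs)) := by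
    funext x
    by_cases h1 : x ∈ gl <;> by_cases h2 : x ∈ bs <;> by_cases h3 : x = c <;>
      simp [h1, h2, h3, List.mem_append]
  rw [hpred, ← List.filter_filter]
  apply List.length_filter_lt_length_iff_exists.mpr
  exact ⟨c, by simp [hcV, hcg, hcb], by simp⟩

-- ---- the main DFS invariant lemma ----

lemma pvDfs_main (adj : Int → List Int) (V : List Int)
    (hadj : ∀ a b, b ∈ adj a → a ∈ V ∧ b ∈ V) :
    ∀ fuel : Nat,
      (∀ (c : Int) (st : PySem.Dict Int Int) (gl bs : List Int),
        pvRep st gl bs → pvInv adj V gl bs → c ∈ V →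
        (∀ g, gl.getLast? = some g → pvE adj g c) → pvWc V gl bs < fuel →
        ((pvDfs adj fuel c st).1 = true → ∃ z, Relation.TransGen (pvE adj) z z) ∧
        ((pvDfs adj fuel c st).1 = false → ∃ bs',
          pvRep (pvDfs adj fuel c st).2 gl bs' ∧ pvInv adj V gl bs' ∧ bs ⊆ bs' ∧ c ∈ bs'))
      ∧
      (∀ (ds : List Int), ∀ (st : PySem.Dict Int Int) (gl bs : List Int) (ctop : Int),
        pvRep st gl bs → pvInv adj V gl bs →
        gl.getLast? = some ctop → (∀ d ∈ ds, pvE adj ctop d) → pvWc V gl bs < fuel →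
        ((pvDfsList adj fuel ds st).1 = true → ∃ z, Relation.TransGen (pvE adj) z z) ∧
        ((pvDfsList adj fuel ds st).1 = false → ∃ bs',
          pvRep (pvDfsList adj fuel ds st).2 gl bs' ∧ pvInv adj V gl bs' ∧ bs ⊆ bs' ∧
          (∀ d ∈ ds, d ∈ bs'))) := by
  intro fuel
  induction fuel with
  | zero =>
    constructor
    · intro c st gl bs _ _ _ _ hfuel; exact absurd hfuel (Nat.not_lt_zero _)
    · intro ds st gl bs ctop _ _ _ _ hfuel; exact absurd hfuel (Nat.not_lt_zero _)
  | succ f ih =>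
    have hGo : ∀ (c : Int) (st : PySem.Dict Int Int) (gl bs : List Int),
        pvRep st gl bs → pvInv adj V gl bs → c ∈ V →
        (∀ g, gl.getLast? = some g → pvE adj g c) → pvWc V gl bs < f + 1 →
        ((pvDfs adj (f + 1) c st).1 = true → ∃ z, Relation.TransGen (pvE adj) z z) ∧
        ((pvDfs adj (f + 1) c st).1 = false → ∃ bs',
          pvRep (pvDfs adj (f + 1) c st).2 gl bs' ∧ pvInv adj V gl bs' ∧ bs ⊆ bs' ∧ c ∈ bs') := by
      intro c st gl bs hrep hinv hcV hlink hfuel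
      obtain ⟨hnd, hglV, hbsV, hdisj, hch, hcl, hnc⟩ := hinv
      have hc0 := hrep c
      by_cases hg : c ∈ gl
      · have h1 : st.getD c 0 = 1 := by rw [hc0, if_pos hg]
        have heq : pvDfs adj (f + 1) c st = (true, st) := by rw [pvDfs, if_pos h1]
        rw [heq]
        exact ⟨fun _ => ⟨c, pvChain_cycle adj gl c hch hg hlink⟩, fun h => by simp at h⟩
      · by_cases hb : c ∈ bs
        · have h2 : st.getD c 0 = 2 := by rw [hc0, if_neg hg, if_pos hb]
          have heq : pvDfs adj (f + 1) c st = (false, st) := by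
            rw [pvDfs, if_neg (by rw [h2]; decide), if_pos h2]
          rw [heq]
          exact ⟨fun h => by simp at h,
            fun _ => ⟨bs, hrep, ⟨hnd, hglV, hbsV, hdisj, hch, hcl, hnc⟩, fun x hx => hx, hb⟩⟩
        · have h0 : st.getD c 0 = 0 := by rw [hc0, if_neg hg, if_neg hb]
          have heq : pvDfs adj (f + 1) c st =
              (if (pvDfsList adj f (adj c) (st.insert c 1)).1
               then (true, (pvDfsList adj f (adj c) (st.insert c 1)).2)
               else (false, (pvDfsList adj f (adj c) (st.insert c 1)).2.insert c 2)) := by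
            rw [pvDfs, if_neg (by rw [h0]; decide), if_neg (by rw [h0]; decide)]
          have hrep1 : pvRep (st.insert c 1) (gl ++ [c]) bs := by
            intro x
            rw [PySem.Dict.getD_insert]
            by_cases hxc : x = c
            · subst hxc; simp [hg]
            · rw [if_neg hxc, hrep x]
              by_cases hxg : x ∈ gl <;> by_cases hxb : x ∈ bs <;>
                simp [hxg, hxb, hxc]
          have hinv1 : pvInv adj V (gl ++ [c]) bs := by
            refine ⟨?_, ?_, hbsV, ?_, ?_, hcl, hnc⟩
            · simp [List.nodup_append, hnd]
              intro a ha hac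
              exact hg (hac ▸ ha)
            · intro x hx
              rcases List.mem_append.mp hx with hx | hx
              · exact hglV x hx
              · simp at hx; subst hx; exact hcV
            · intro x hx
              rcases List.mem_append.mp hx with hx | hx
              · exact hdisj x hx
              · simp at hx; subst hx; exact hb
            · refine List.isChain_append.mpr ⟨hch, by simp, ?_⟩
              intro x hx y hy
              simp only [List.head?_cons, Option.mem_def, Option.some.injEq] at hy
              subst hy
              exact hlink x hx
          have hwc1 : pvWc V (gl ++ [c]) bs < f := by
            have := pvWc_gray_lt V gl bs c hcV hg hb
            omega
          have hl := ih.2 (adj c) (st.insert c 1) (gl ++ [c]) bs c hrep1 hinv1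
            List.getLast?_concat (fun d hd => hd) hwc1
          by_cases hr : (pvDfsList adj f (adj c) (st.insert c 1)).1 = true
          · rw [heq, if_pos hr]
            exact ⟨fun _ => hl.1 hr, fun h => by simp at h⟩
          · rw [Bool.not_eq_true] at hr
            obtain ⟨bs', hrep', hinv', hsub', hall'⟩ := hl.2 hr
            obtain ⟨hnd', hglV', hbsV', hdisj', hch', hcl', hnc'⟩ := hinv'
            have hcb' : c ∉ bs' := hdisj' c (by simp)
            rw [heq, if_neg (by simp [hr])]
            refine ⟨fun h => by simp at h, fun _ => ⟨bs' ++ [c], ?_, ?_, ?_, by simp⟩⟩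
            · intro x
              rw [PySem.Dict.getD_insert]
              by_cases hxc : x = c
              · subst hxc; simp [hg]
              · rw [if_neg hxc, hrep' x]
                by_cases hxg : x ∈ gl <;> by_cases hxb : x ∈ bs' <;>
                  simp [hxg, hxb, hxc]
            · refine ⟨(List.nodup_append.mp hnd').1, ?_, ?_, ?_, (List.isChain_append.mp hch').1, ?_, ?_⟩
              · intro x hx; exact hglV' x (List.mem_append_left _ hx)
              · intro x hx
                rcases List.mem_append.mp hx with hx | hx
                · exact hbsV' x hx
                · simp at hx; subst hx; exact hcV
              · intro x hx hxb
                rcases List.mem_append.mp hxb with hxb | hxb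
                · exact hdisj' x (List.mem_append_left _ hx) hxb
                · simp at hxb; subst hxb; exact hg hx
              · intro b hbmem x hxadj
                rcases List.mem_append.mp hbmem with hbmem | hbmem
                · exact List.mem_append_left _ (hcl' b hbmem x hxadj)
                · simp at hbmem; subst hbmem
                  exact List.mem_append_left _ (hall' x hxadj)
              · intro b hbmem
                rcases List.mem_append.mp hbmem with hbmem | hbmem
                · exact hnc' b hbmem
                · simp at hbmem; subst hbmem
                  exact pvNoNewCycle adj bs' b hcl' hall' hcb'
            · intro x hx; exact List.mem_append_left _ (hsub' hx)
    refine ⟨hGo, ?_⟩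
    intro ds
    induction ds with
    | nil =>
      intro st gl bs ctop hrep hinv _ _ _
      have heq : pvDfsList adj (f + 1) [] st = (false, st) := by rw [pvDfsList]
      rw [heq]
      exact ⟨fun h => by simp at h, fun _ => ⟨bs, hrep, hinv, fun x hx => hx, by simp⟩⟩
    | cons d ds ihds =>
      intro st gl bs ctop hrep hinv hlast hds hfuel
      have heq : pvDfsList adj (f + 1) (d :: ds) st =
          (if (pvDfs adj (f + 1) d st).1 then pvDfs adj (f + 1) d st
           else pvDfsList adj (f + 1) ds (pvDfs adj (f + 1) d st).2) := by
        rw [pvDfsList]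
      have hdV : d ∈ V := (hadj ctop d (hds d (by simp))).2
      have hlinkd : ∀ g, gl.getLast? = some g → pvE adj g d := by
        intro g hgq
        rw [hlast] at hgq
        cases hgq
        exact hds d (by simp)
      have hgo := hGo d st gl bs hrep hinv hdV hlinkd hfuel
      by_cases hr : (pvDfs adj (f + 1) d st).1 = true
      · rw [heq, if_pos hr]
        exact ⟨fun _ => hgo.1 hr, fun h => by rw [hr] at h; simp at h⟩
      · rw [Bool.not_eq_true] at hr
        obtain ⟨bs1, hrep1, hinv1, hsub1, hd1⟩ := hgo.2 hr
        have hwc1 : pvWc V gl bs1 < f + 1 :=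
          lt_of_le_of_lt (pvWc_mono V gl bs bs1 hsub1) hfuel
        have hrec := ihds (pvDfs adj (f + 1) d st).2 gl bs1 ctop hrep1 hinv1 hlast
          (fun d' hd' => hds d' (by simp [hd'])) hwc1
        rw [heq, if_neg (by simp [hr])]
        refine ⟨hrec.1, fun hf2 => ?_⟩
        obtain ⟨bs2, hrep2, hinv2, hsub2, hall2⟩ := hrec.2 hf2
        refine ⟨bs2, hrep2, hinv2, fun x hx => hsub2 (hsub1 hx), ?_⟩
        intro d' hd'
        rcases List.mem_cons.mp hd' with rfl | hd'
        · exact hsub2 hd1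
        · exact hall2 d' hd'

-- ---- the top-level DFS loop ----

lemma pvDfsAll_ok (adj : Int → List Int) (V : List Int)
    (hadj : ∀ a b, b ∈ adj a → a ∈ V ∧ b ∈ V) :
    ∀ (cs : List Int) (st : PySem.Dict Int Int) (bs : List Int),
      pvRep st [] bs → pvInv adj V [] bs → (∀ c ∈ cs, c ∈ V) →
      ((pvDfsAll adj (V.length + 1) cs st = true →
        ∃ bs', bs ⊆ bs' ∧ pvInv adj V [] bs' ∧ ∀ c ∈ cs, c ∈ bs') ∧
       (pvDfsAll adj (V.length + 1) cs st = false → ∃ z, Relation.TransGen (pvE adj) z z)) := by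
  intro cs
  induction cs with
  | nil =>
    intro st bs hrep hinv _
    refine ⟨fun _ => ⟨bs, fun x hx => hx, hinv, by simp⟩, fun h => ?_⟩
    rw [pvDfsAll] at h
    simp at h
  | cons c cs ihcs =>
    intro st bs hrep hinv hcs
    have hfuel : pvWc V [] bs < V.length + 1 := Nat.lt_succ_of_le (pvWc_le V [] bs)
    have hc0 := hrep c
    rw [if_neg (by simp)] at hc0
    have heq : pvDfsAll adj (V.length + 1) (c :: cs) st =
        (if st.getD c 0 = 0 then
          (if (pvDfs adj (V.length + 1) c st).1 then false
           else pvDfsAll adj (V.length + 1) cs (pvDfs adj (V.length + 1) c st).2)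
         else pvDfsAll adj (V.length + 1) cs st) := by
      rw [pvDfsAll]
    by_cases hb : c ∈ bs
    · have hw : ¬ st.getD c 0 = 0 := by rw [hc0, if_pos hb]; decide
      rw [heq, if_neg hw]
      have hr := ihcs st bs hrep hinv (fun x hx => hcs x (by simp [hx]))
      refine ⟨fun ht => ?_, hr.2⟩
      obtain ⟨bs', hsub, hinv', hall⟩ := hr.1 ht
      refine ⟨bs', hsub, hinv', ?_⟩
      intro x hx
      rcases List.mem_cons.mp hx with rfl | hx
      · exact hsub hb
      · exact hall x hx
    · have hw : st.getD c 0 = 0 := by rw [hc0, if_neg hb]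
      rw [heq, if_pos hw]
      have hgo := (pvDfs_main adj V hadj (V.length + 1)).1 c st [] bs hrep hinv
        (hcs c (by simp)) (fun gq hgq => by simp at hgq) hfuel
      by_cases hr : (pvDfs adj (V.length + 1) c st).1 = true
      · rw [if_pos hr]
        exact ⟨fun h => by simp at h, fun _ => hgo.1 hr⟩
      · rw [Bool.not_eq_true] at hr
        rw [if_neg (by simp [hr])]
        obtain ⟨bs1, hrep1, hinv1, hsub1, hc1⟩ := hgo.2 hr
        have hrec := ihcs (pvDfs adj (V.length + 1) c st).2 bs1 hrep1 hinv1
          (fun x hx => hcs x (by simp [hx]))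
        refine ⟨fun ht => ?_, hrec.2⟩
        obtain ⟨bs2, hsub2, hinv2, hall2⟩ := hrec.1 ht
        refine ⟨bs2, fun x hx => hsub2 (hsub1 hx), hinv2, ?_⟩
        intro x hx
        rcases List.mem_cons.mp hx with rfl | hx
        · exact hsub2 hc1
        · exact hall2 x hx

-- the initial state dict maps everything to WHITE
lemma pvInit_rep (l : List Int) :
    ∀ (d : PySem.Dict Int Int), (∀ x, d.getD x 0 = 0) →
      ∀ x, (l.foldl (fun d c => d.insert c (0 : Int)) d).getD x 0 = 0 := by
  induction l with
  | nil => intro d hd; exact hd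
  | cons c l ih =>
    intro d hd
    rw [List.foldl_cons]
    refine ih _ ?_
    intro x
    rw [PySem.Dict.getD_insert]
    split_ifs with h
    · rfl
    · exact hd x

-- A's DFS answer is exactly acyclicity of the dependency relation
lemma pvA_iff (adj : Int → List Int) (V : List Int)
    (hadj : ∀ a b, b ∈ adj a → a ∈ V ∧ b ∈ V) :
    (pvDfsAll adj (V.length + 1) V
        (V.foldl (fun d c => d.insert c (0 : Int)) PySem.Dict.empty) = true
      ↔ ∀ z, ¬ Relation.TransGen (pvE adj) z z) := by
  have hrep0 : pvRep (V.foldl (fun d c => d.insert c (0 : Int)) PySem.Dict.empty) [] [] := by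
    intro x
    rw [pvInit_rep V PySem.Dict.empty (fun x => by rw [PySem.Dict.getD_empty]) x]
    simp
  have hinv0 : pvInv adj V [] [] := by
    refine ⟨by simp, by simp, by simp, by simp, by simp, ?_, by simp⟩
    intro b hb; simp at hb
  have hmain := pvDfsAll_ok adj V hadj V _ [] hrep0 hinv0 (fun x hx => hx)
  constructor
  · intro ht z hz
    obtain ⟨bs', _, hinv', hall⟩ := hmain.1 ht
    obtain ⟨_, _, _, _, _, _, hnc'⟩ := hinv'
    exact hnc' z (hall z (pvCycle_in adj V hadj hz)) hz
  · intro hnc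
    cases h : pvDfsAll adj (V.length + 1) V
        (V.foldl (fun d c => d.insert c (0 : Int)) PySem.Dict.empty) with
    | true => rfl
    | false =>
      obtain ⟨z, hz⟩ := hmain.2 h
      exact absurd hz (hnc z)

-- ---- B: iterated source elimination ----

lemma pvShrink_eq_of_eq {es : PySem.Set (Int × Int)} {rem : List Int}
    (h : (pvPrune es rem).length = rem.length) : pvShrink es rem = rem := by
  rw [pvShrink.eq_def]
  simp [h]

lemma pvShrink_eq_of_ne {es : PySem.Set (Int × Int)} {rem : List Int}
    (h : (pvPrune es rem).length ≠ rem.length) :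
    pvShrink es rem = pvShrink es (pvPrune es rem) := by
  rw [pvShrink.eq_def]
  simp [h]

lemma mem_pvPrune (es : PySem.Set (Int × Int)) (rem : List Int) (c : Int) :
    c ∈ pvPrune es rem ↔ c ∈ rem ∧ ∃ p ∈ es, p.2 = c ∧ p.1 ∈ rem := by
  unfold pvPrune pvTargets
  rw [PySem.Set.mem_inter, PySem.Set.mem_ofList]
  simp only [List.mem_map, List.mem_filter, decide_eq_true_eq]
  constructor
  · rintro ⟨h1, p, ⟨hp, hpa⟩, hpc⟩
    exact ⟨h1, p, hp, hpc, hpa⟩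
  · rintro ⟨h1, p, hp, hpc, hpa⟩
    exact ⟨h1, p, ⟨hp, hpa⟩, hpc⟩

-- every color on a cycle survives every elimination round
lemma pvPrune_cyc (adj : Int → List Int) (es : PySem.Set (Int × Int))
    (hes : ∀ a b : Int, ((a, b) ∈ es ↔ pvE adj a b)) (rem : List Int)
    (h : ∀ c, Relation.TransGen (pvE adj) c c → c ∈ rem) :
    ∀ c, Relation.TransGen (pvE adj) c c → c ∈ pvPrune es rem := by
  intro c hc
  rw [mem_pvPrune]
  obtain ⟨a, hac, ha⟩ := pvCycle_pred adj hc
  exact ⟨h c hc, (a, c), (hes a c).mpr hac, rfl, h a ha⟩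

lemma pvShrink_cyc (adj : Int → List Int) (es : PySem.Set (Int × Int))
    (hes : ∀ a b : Int, ((a, b) ∈ es ↔ pvE adj a b)) :
    ∀ (N : Nat) (rem : List Int), rem.length ≤ N →
      (∀ c, Relation.TransGen (pvE adj) c c → c ∈ rem) →
      ∀ c, Relation.TransGen (pvE adj) c c → c ∈ pvShrink es rem := by
  intro N
  induction N with
  | zero =>
    intro rem hl h c hc
    have hrem : rem = [] := by
      cases rem with
      | nil => rfl
      | cons x xs => simp at hl
    subst hrem
    exact absurd (h c hc) (by simp)
  | succ N ih =>
    intro rem hl h c hc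
    by_cases hlen : (pvPrune es rem).length = rem.length
    · rw [pvShrink_eq_of_eq hlen]
      exact h c hc
    · rw [pvShrink_eq_of_ne hlen]
      exact ih (pvPrune es rem) (by have := pvPrune_length_le es rem; omega)
        (pvPrune_cyc adj es hes rem h) c hc

-- without cycles iterated elimination reaches the empty set
lemma pvShrink_empty (adj : Int → List Int) (es : PySem.Set (Int × Int))
    (hes : ∀ a b : Int, ((a, b) ∈ es ↔ pvE adj a b))
    (hnc : ∀ z, ¬ Relation.TransGen (pvE adj) z z) :
    ∀ (N : Nat) (rem : List Int), rem.Nodup → rem.length ≤ N → pvShrink es rem = [] := by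
  intro N
  induction N with
  | zero =>
    intro rem _ hl
    have hrem : rem = [] := by
      cases rem with
      | nil => rfl
      | cons x xs => simp at hl
    subst hrem
    exact pvShrink_eq_of_eq rfl
  | succ N ih =>
    intro rem hnd hl
    rcases eq_or_ne rem [] with rfl | hne
    · exact pvShrink_eq_of_eq rfl
    · obtain ⟨mmin, hm, hmin⟩ := pvExistsMin
        (Relation.TransGen (fun x y => pvE adj x y ∧ x ∈ rem ∧ y ∈ rem))
        (fun a b c h1 h2 => h1.trans h2) rem
        (fun a _ hra => hnc a (Relation.TransGen.mono (fun x y h => h.1) hra)) hne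
      have hcont : ¬ ((pvTargets es rem).contains mmin = true) := by
        intro h
        rw [PySem.Set.contains_iff] at h
        unfold pvTargets at h
        rw [PySem.Set.mem_ofList] at h
        simp only [List.mem_map, List.mem_filter, decide_eq_true_eq] at h
        obtain ⟨p, ⟨hp, hpa⟩, hpc⟩ := h
        have hpm : (p.1, mmin) ∈ es := by rw [← hpc, Prod.mk.eta]; exact hp
        exact hmin p.1 hpa (Relation.TransGen.single ⟨(hes _ _).mp hpm, hpa, hm⟩)
      have hlt : (pvPrune es rem).length < rem.length := by
        exact List.length_filter_lt_length_iff_exists.mpr ⟨mmin, hm, hcont⟩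
      rw [pvShrink_eq_of_ne (by omega)]
      exact ih (pvPrune es rem) (PySem.Set.nodup_inter _ _ hnd) (by omega)

-- B's answer is exactly acyclicity as well
lemma pvB_iff (adj : Int → List Int) (V : List Int) (es : PySem.Set (Int × Int))
    (hadj : ∀ a b, b ∈ adj a → a ∈ V ∧ b ∈ V)
    (hes : ∀ a b : Int, ((a, b) ∈ es ↔ pvE adj a b)) :
    ((pvShrink es (PySem.Set.ofList V)).isEmpty = true
      ↔ ∀ z, ¬ Relation.TransGen (pvE adj) z z) := by
  constructor
  · intro ht z hz
    have hz' : z ∈ pvShrink es (PySem.Set.ofList V) := by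
      refine pvShrink_cyc adj es hes (PySem.Set.ofList V).length (PySem.Set.ofList V)
        (le_refl _) ?_ z hz
      intro c hc
      rw [PySem.Set.mem_ofList]
      exact pvCycle_in adj V hadj hc
    rw [List.isEmpty_iff] at ht
    rw [ht] at hz'
    simp at hz'
  · intro hnc
    rw [List.isEmpty_iff]
    exact pvShrink_empty adj es hes hnc (PySem.Set.ofList V).length (PySem.Set.ofList V)
      (PySem.Set.nodup_ofList V) (le_refl _)

-- ---- assembly ----

lemma pvBody_eq (g : List (List Int)) (m n : Int) :
    pvDfsAll (fun a => (pvDeps g (pvRects g m n)).getD a PySem.Set.empty)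
      ((pvRects g m n).items.length + 1) (pvRects g m n).keys
      ((pvRects g m n).keys.foldl (fun d c => d.insert c (0 : Int)) PySem.Dict.empty)
    = (pvShrink (pvEdges g (pvRects g m n))
        (PySem.Set.ofList (pvRects g m n).keys)).isEmpty := by
  set cr := pvRects g m n with hcr
  set adj := fun a => (pvDeps g cr).getD a PySem.Set.empty with hadjdef
  have hlen : cr.items.length = cr.keys.length := by
    simp [PySem.Dict.keys]
  have hadj : ∀ a b, b ∈ adj a → a ∈ cr.keys ∧ b ∈ cr.keys := by
    intro a b hb
    rw [hadjdef] at hb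
    exact pvHasEdge_endpoints g m n a b ((pvDeps_mem g cr a b).mp hb)
  have hes : ∀ a b : Int, ((a, b) ∈ pvEdges g cr ↔ pvE adj a b) := by
    intro a b
    rw [pvEdges_mem g cr a b]
    show _ ↔ b ∈ adj a
    rw [hadjdef]
    exact (pvDeps_mem g cr a b).symm
  rw [Bool.eq_iff_iff, hlen, pvA_iff adj cr.keys hadj,
    pvB_iff adj cr.keys (pvEdges g cr) hadj hes]

-- ===== VERDICT (by name: the statement is the Claim_ definition above) =====
theorem isPrintable_dfs_cycle_detection_spec : Claim_equal_isPrintable_dfs_cycle_detection := by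
  intro g _ _
  unfold Spec_isPrintable_dfs_cycle_detection
  unfold isPrintable_dfs_cycle_detection isPrintable_dfs_cycle_detection_alt
  by_cases hguard : g = [] ∨ g.headD [] = []
  · rw [if_pos hguard, if_pos hguard]
  · rw [if_neg hguard, if_neg hguard]
    exact pvBody_eq g (g.length : Int) ((g.headD []).length : Int)
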